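-- pv_equiv track=rewrite | github.com/DmitryKorolyov/AES | AES.py | __offset
-- ===== SOURCE A (Python) =====
-- def __offset(matrix, direction, step_value, num = None): # сдвиг в матрице/векторе заданной строки/столбца в нужном направлении
-- 	if (num != None):
-- 		if (direction == 'up'):
-- 			for s in range(step_value):
-- 				cache = matrix[0][num]
-- 				for i in range(3):
-- 					matrix[i][num] = matrix[i + 1][num]
-- 				matrix[3][num] = cache
-- 		elif (direction == 'right'):
-- 			for i in range(step_value):
-- 				cache = matrix[num][3]
-- 				for i in range(3, 0, -1):
-- 					matrix[num][i] = matrix[num][i - 1]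
-- 				matrix[num][0] = cache
-- 		elif (direction == 'down'):
-- 			for i in range(step_value):
-- 				cache = matrix[3][num]
-- 				for i in range(3, 0, -1):
-- 					matrix[i][num] = matrix[i - 1][num]
-- 				matrix[0][num] = cache
-- 		elif (direction == 'left'):
-- 			for i in range(step_value):
-- 				cache = matrix[num][0]
-- 				for i in range(3):
-- 					matrix[num][i] = matrix[num][i + 1]
-- 				matrix[num][3] = cache
-- 		return matrix
-- 	else:
-- 		vector = matrix
-- 		if (direction == 'up'):
-- 			for s in range(step_value):
-- 				cache = vector[0]
-- 				for i in range(3):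
-- 					vector[i] = vector[i + 1]
-- 				vector[3] = cache
-- 		elif (direction == 'down'):
-- 			for s in range(step_value):
-- 				cache = vector[3]
-- 				for i in range(3, 0, -1):
-- 					vector[i] = vector[i - 1]
-- 				vector[0] = cache
-- 		return vector
-- ===== SOURCE B (Python) =====
-- def __offset(matrix, direction, step_value, num = None):
-- 	# closed form: a cyclic shift repeated step_value times equals one rotation by step_value % 4
-- 	if step_value <= 0:
-- 		return matrix
-- 	k = step_value % 4
-- 	if num is not None:
-- 		if direction == 'up' or direction == 'down':
-- 			col = [matrix[i][num] for i in range(4)]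
-- 			r = k if direction == 'up' else (4 - k) % 4
-- 			col = col[r:] + col[:r]
-- 			for i in range(4):
-- 				matrix[i][num] = col[i]
-- 		elif direction == 'right' or direction == 'left':
-- 			row = matrix[num]
-- 			r = k if direction == 'left' else (4 - k) % 4
-- 			row[:4] = row[r:4] + row[:r]
-- 		return matrix
-- 	else:
-- 		if direction == 'up':
-- 			matrix[:4] = matrix[k:4] + matrix[:k]
-- 		elif direction == 'down':
-- 			r = (4 - k) % 4
-- 			matrix[:4] = matrix[r:4] + matrix[:r]
-- 		return matrix
-- ===== Notes on version B (the rewrite author's own statement) =====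
-- stated objective: alternative
-- what changed: Replaces A's step_value-fold repetition of single element-by-element cyclic shifts by one closed-form slice rotation: B computes k = step_value % 4 once and rotates the row/column/vector by k in a single step.
import Mathlib
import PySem

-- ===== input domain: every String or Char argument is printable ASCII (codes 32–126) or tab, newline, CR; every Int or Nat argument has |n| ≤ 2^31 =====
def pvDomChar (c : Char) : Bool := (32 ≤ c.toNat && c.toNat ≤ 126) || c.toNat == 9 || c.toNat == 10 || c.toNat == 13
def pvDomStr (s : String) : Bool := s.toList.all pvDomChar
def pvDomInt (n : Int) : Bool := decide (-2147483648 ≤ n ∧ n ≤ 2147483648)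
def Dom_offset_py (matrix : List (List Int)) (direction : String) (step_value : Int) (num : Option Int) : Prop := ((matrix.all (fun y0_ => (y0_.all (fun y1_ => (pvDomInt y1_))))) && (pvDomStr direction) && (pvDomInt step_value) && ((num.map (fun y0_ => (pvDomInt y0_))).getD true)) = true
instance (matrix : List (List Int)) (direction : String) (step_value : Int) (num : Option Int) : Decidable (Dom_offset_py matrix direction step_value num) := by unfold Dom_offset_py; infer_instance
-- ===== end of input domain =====

-- B replaces A's step_value-long loop of single cyclic shifts by one closed-form rotation by
-- step_value % 4 (objective: alternative). Python A and B mutate `matrix` in place; the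
-- equivalence proved here is about the RETURN value only.

-- ===== PORT A =====
def offset_py (matrix : List (List Int)) (direction : String) (step_value : Int) (num : Option Int) : List (List Int) :=
  match num with
  | some n =>
    if direction = "up" then
      (PySem.List.pyRange 0 step_value 1).foldl (fun m _ =>
        let cache := PySem.List.pyGetD (PySem.List.pyGetD m 0 []) n 0
        let m := (PySem.List.pyRange 0 3 1).foldl (fun m i =>
          PySem.List.pySetD m i (PySem.List.pySetD (PySem.List.pyGetD m i []) n
            (PySem.List.pyGetD (PySem.List.pyGetD m (i + 1) []) n 0))) m
        PySem.List.pySetD m 3 (PySem.List.pySetD (PySem.List.pyGetD m 3 []) n cache)) matrix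
    else if direction = "right" then
      (PySem.List.pyRange 0 step_value 1).foldl (fun m _ =>
        let cache := PySem.List.pyGetD (PySem.List.pyGetD m n []) 3 0
        let m := (PySem.List.pyRange 3 0 (-1)).foldl (fun m i =>
          PySem.List.pySetD m n (PySem.List.pySetD (PySem.List.pyGetD m n []) i
            (PySem.List.pyGetD (PySem.List.pyGetD m n []) (i - 1) 0))) m
        PySem.List.pySetD m n (PySem.List.pySetD (PySem.List.pyGetD m n []) 0 cache)) matrix
    else if direction = "down" then
      (PySem.List.pyRange 0 step_value 1).foldl (fun m _ =>
        let cache := PySem.List.pyGetD (PySem.List.pyGetD m 3 []) n 0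
        let m := (PySem.List.pyRange 3 0 (-1)).foldl (fun m i =>
          PySem.List.pySetD m i (PySem.List.pySetD (PySem.List.pyGetD m i []) n
            (PySem.List.pyGetD (PySem.List.pyGetD m (i - 1) []) n 0))) m
        PySem.List.pySetD m 0 (PySem.List.pySetD (PySem.List.pyGetD m 0 []) n cache)) matrix
    else if direction = "left" then
      (PySem.List.pyRange 0 step_value 1).foldl (fun m _ =>
        let cache := PySem.List.pyGetD (PySem.List.pyGetD m n []) 0 0
        let m := (PySem.List.pyRange 0 3 1).foldl (fun m i =>
          PySem.List.pySetD m n (PySem.List.pySetD (PySem.List.pyGetD m n []) i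
            (PySem.List.pyGetD (PySem.List.pyGetD m n []) (i + 1) 0))) m
        PySem.List.pySetD m n (PySem.List.pySetD (PySem.List.pyGetD m n []) 3 cache)) matrix
    else matrix
  | none =>
    if direction = "up" then
      (PySem.List.pyRange 0 step_value 1).foldl (fun v _ =>
        let cache := PySem.List.pyGetD v 0 []
        let v := (PySem.List.pyRange 0 3 1).foldl (fun v i =>
          PySem.List.pySetD v i (PySem.List.pyGetD v (i + 1) [])) v
        PySem.List.pySetD v 3 cache) matrix
    else if direction = "down" then
      (PySem.List.pyRange 0 step_value 1).foldl (fun v _ =>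
        let cache := PySem.List.pyGetD v 3 []
        let v := (PySem.List.pyRange 3 0 (-1)).foldl (fun v i =>
          PySem.List.pySetD v i (PySem.List.pyGetD v (i - 1) [])) v
        PySem.List.pySetD v 0 cache) matrix
    else matrix

-- ===== PORT B =====
def offset_py_alt (matrix : List (List Int)) (direction : String) (step_value : Int) (num : Option Int) : List (List Int) :=
  if step_value ≤ 0 then matrix
  else
    let k := PySem.Int.mod step_value 4
    match num with
    | some n =>
      if direction = "up" ∨ direction = "down" then
        let col := (PySem.List.pyRange 0 4 1).map (fun i =>
          PySem.List.pyGetD (PySem.List.pyGetD matrix i []) n 0)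
        let r := if direction = "up" then k else PySem.Int.mod (4 - k) 4
        let col := PySem.List.slice col (some r) none ++ PySem.List.slice col none (some r)
        (PySem.List.pyRange 0 4 1).foldl (fun m i =>
          PySem.List.pySetD m i (PySem.List.pySetD (PySem.List.pyGetD m i []) n
            (PySem.List.pyGetD col i 0))) matrix
      else if direction = "right" ∨ direction = "left" then
        let row := PySem.List.pyGetD matrix n []
        let r := if direction = "left" then k else PySem.Int.mod (4 - k) 4
        let row := (PySem.List.slice row (some r) (some 4) ++ PySem.List.slice row none (some r))
          ++ PySem.List.slice row (some 4) none
        PySem.List.pySetD matrix n row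
      else matrix
    | none =>
      if direction = "up" then
        (PySem.List.slice matrix (some k) (some 4) ++ PySem.List.slice matrix none (some k))
          ++ PySem.List.slice matrix (some 4) none
      else if direction = "down" then
        let r := PySem.Int.mod (4 - k) 4
        (PySem.List.slice matrix (some r) (some 4) ++ PySem.List.slice matrix none (some r))
          ++ PySem.List.slice matrix (some 4) none
      else matrix



-- ===== PRECONDITION & SPEC =====
-- Pre_ excludes exactly the inputs on which Python A raises IndexError: a positive step with a
-- matrix/row/column too short for the four accessed positions, or a row/column index out of range.
def Pre_offset_py (matrix : List (List Int)) (direction : String) (step_value : Int) (num : Option Int) : Prop :=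
  step_value ≤ 0 ∨
  match num with
  | some n =>
    if direction = "up" ∨ direction = "down" then
      4 ≤ matrix.length ∧ ∀ r ∈ matrix.take 4, PySem.Raise.InRange r.length n
    else if direction = "right" ∨ direction = "left" then
      PySem.Raise.InRange matrix.length n ∧ 4 ≤ (PySem.List.pyGetD matrix n []).length
    else True
  | none =>
    if direction = "up" ∨ direction = "down" then 4 ≤ matrix.length else True

instance (matrix : List (List Int)) (direction : String) (step_value : Int) (num : Option Int) : Decidable (Pre_offset_py matrix direction step_value num) := by unfold Pre_offset_py PySem.Raise.InRange; cases num <;> infer_instance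

def pvWitness_offset_py : List (List Int) × String × Int × Option Int :=
  ([[1, 2, 3, 4], [5, 6, 7, 8], [9, 10, 11, 12], [13, 14, 15, 16]], "up", 2, some 1)

def Spec_offset_py (matrix : List (List Int)) (direction : String) (step_value : Int) (num : Option Int) (out : List (List Int)) : Prop := out = offset_py_alt matrix direction step_value num
instance (matrix : List (List Int)) (direction : String) (step_value : Int) (num : Option Int) (out : List (List Int)) : Decidable (Spec_offset_py matrix direction step_value num out) := by unfold Spec_offset_py; infer_instance

-- ===== CLAIM (what is proved, stated in full; the proofs are below) =====
def Claim_equal_offset_py : Prop := ∀ (matrix : List (List Int)) (direction : String) (step_value : Int) (num : Option Int), Dom_offset_py matrix direction step_value num → Pre_offset_py matrix direction step_value num → Spec_offset_py matrix direction step_value num (offset_py matrix direction step_value num)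

-- ===== LEMMAS AND PROOFS =====

-- index normalization for Python's negative-index convention
def nidx (len : Nat) (n : Int) : Nat := if 0 ≤ n then n.toNat else len - (-n).toNat

theorem pyIdx_eq {len : Nat} {n : Int} (h : PySem.Raise.InRange len n) :
    PySem.List.pyIdx? len n = some (nidx len n) := by
  obtain ⟨h1, h2⟩ := h
  simp only [PySem.List.pyIdx?, nidx]
  split_ifs <;> simp_all

theorem nidx_lt {len : Nat} {n : Int} (h : PySem.Raise.InRange len n) : nidx len n < len := by
  obtain ⟨h1, h2⟩ := h; simp only [nidx]; split_ifs <;> omega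

theorem pyGetD_eq {α : Type} {xs : List α} {n : Int} (d : α) (h : PySem.Raise.InRange xs.length n) :
    PySem.List.pyGetD xs n d = xs.getD (nidx xs.length n) d := by
  simp [PySem.List.pyGetD, PySem.List.pyGet?, pyIdx_eq h, List.getD]

theorem pySetD_eq {α : Type} {xs : List α} {n : Int} (v : α) (h : PySem.Raise.InRange xs.length n) :
    PySem.List.pySetD xs n v = xs.set (nidx xs.length n) v := by
  simp [PySem.List.pySetD, PySem.List.pySet?, pyIdx_eq h]

theorem len_setD {α : Type} (xs : List α) (n : Int) (v : α) :
    (PySem.List.pySetD xs n v).length = xs.length := by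
  simp [PySem.List.pySetD, PySem.List.pySet?]
  cases PySem.List.pyIdx? xs.length n <;> simp

theorem getD_setD_self {α : Type} {xs : List α} {n : Int} (v : α) (d : α)
    (h : PySem.Raise.InRange xs.length n) :
    PySem.List.pyGetD (PySem.List.pySetD xs n v) n d = v := by
  rw [pySetD_eq v h, pyGetD_eq d (by simpa [List.length_set] using h)]
  simp [List.length_set, List.getD]
  rw [List.getElem?_set_self']
  simp [nidx_lt h]

theorem setD_setD {α : Type} {xs : List α} {n : Int} (v w : α)
    (h : PySem.Raise.InRange xs.length n) :
    PySem.List.pySetD (PySem.List.pySetD xs n v) n w = PySem.List.pySetD xs n w := by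
  rw [pySetD_eq v h, pySetD_eq w (by simpa [List.length_set] using h), pySetD_eq w h]
  simp [List.length_set, List.set_set]

theorem setD_getD_self {α : Type} {xs : List α} {n : Int} (d : α)
    (h : PySem.Raise.InRange xs.length n) :
    PySem.List.pySetD xs n (PySem.List.pyGetD xs n d) = xs := by
  rw [pyGetD_eq d h, pySetD_eq _ h]
  simp [List.getD, List.getElem?_eq_getElem (nidx_lt h)]

-- ranges and constant folds
theorem pyRange_nonpos {s : Int} (h : s ≤ 0) : PySem.List.pyRange 0 s 1 = [] := by
  simp [PySem.List.pyRange]; omega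

theorem length_pyRange_one (s : Int) (h : 0 ≤ s) : (PySem.List.pyRange 0 s 1).length = s.toNat := by
  simp [PySem.List.pyRange]
  intro h2; omega

theorem foldl_const {α β : Type} (f : α → α) (l : List β) (x : α) :
    l.foldl (fun a _ => f a) x = f^[l.length] x := by
  induction l generalizing x with
  | nil => rfl
  | cons h t ih => simp [List.foldl_cons, ih, Function.iterate_succ_apply]

theorem iter_congr {α : Type} (f g : α → α) (P : α → Prop)
    (hfg : ∀ x, P x → f x = g x) (hP : ∀ x, P x → P (g x)) :
    ∀ (t : Nat) (x : α), P x → f^[t] x = g^[t] x := by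
  intro t
  induction t with
  | zero => intro x _; rfl
  | succ t ih =>
    intro x hx
    rw [Function.iterate_succ_apply, Function.iterate_succ_apply, hfg x hx, ih _ (hP x hx)]

theorem iter_mod_four {α : Type} (f : α → α) (P : α → Prop)
    (hP : ∀ x, P x → P (f x)) (h4 : ∀ x, P x → f^[4] x = x) :
    ∀ (t : Nat) (x : α), P x → f^[t] x = f^[t % 4] x := by
  intro t
  induction t using Nat.strong_induction_on with
  | _ t ih =>
    intro x hx
    by_cases ht : t < 4
    · rw [Nat.mod_eq_of_lt ht]
    · have h1 : t = (t - 4) + 4 := by omega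
      rw [h1, Function.iterate_add_apply, h4 x hx, ih (t - 4) (by omega) x hx]
      congr 1
      omega

theorem exists4 {α : Type} {l : List α} (h : 4 ≤ l.length) :
    ∃ a b c d t, l = a :: b :: c :: d :: t := by
  rcases l with _ | ⟨a, _ | ⟨b, _ | ⟨c, _ | ⟨d, t⟩⟩⟩⟩ <;> simp_all <;> omega

theorem int_mod_four (s : Int) (hs : 0 ≤ s) : PySem.Int.mod s 4 = ((s.toNat % 4 : Nat) : Int) := by
  rw [← Int.toNat_of_nonneg hs]
  exact_mod_cast PySem.Int.mod_natCast s.toNat 4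

-- the four-slot left / right rotations
def rot4L {α : Type} : List α → List α
  | a :: b :: c :: d :: t => b :: c :: d :: a :: t
  | l => l

def rot4R {α : Type} : List α → List α
  | a :: b :: c :: d :: t => d :: a :: b :: c :: t
  | l => l

theorem rot4L_len {α : Type} (l : List α) : (rot4L l).length = l.length := by
  rcases l with _ | ⟨a, _ | ⟨b, _ | ⟨c, _ | ⟨d, t⟩⟩⟩⟩ <;> simp [rot4L]

theorem rot4R_len {α : Type} (l : List α) : (rot4R l).length = l.length := by
  rcases l with _ | ⟨a, _ | ⟨b, _ | ⟨c, _ | ⟨d, t⟩⟩⟩⟩ <;> simp [rot4R]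

theorem rot4L_four {α : Type} (l : List α) (h : 4 ≤ l.length) : rot4L^[4] l = l := by
  obtain ⟨a, b, c, d, t, rfl⟩ := exists4 h
  rfl

theorem rot4R_four {α : Type} (l : List α) (h : 4 ≤ l.length) : rot4R^[4] l = l := by
  obtain ⟨a, b, c, d, t, rfl⟩ := exists4 h
  rfl

-- ---------- vector case (num = None) ----------
def vbodyU (v : List (List Int)) : List (List Int) :=
  let cache := PySem.List.pyGetD v 0 []
  let v := (PySem.List.pyRange 0 3 1).foldl (fun v i => PySem.List.pySetD v i (PySem.List.pyGetD v (i + 1) [])) v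
  PySem.List.pySetD v 3 cache

def vbodyD (v : List (List Int)) : List (List Int) :=
  let cache := PySem.List.pyGetD v 3 []
  let v := (PySem.List.pyRange 3 0 (-1)).foldl (fun v i => PySem.List.pySetD v i (PySem.List.pyGetD v (i - 1) [])) v
  PySem.List.pySetD v 0 cache

theorem offsetA_up_none (m : List (List Int)) (s : Int) :
    offset_py m "up" s none = vbodyU^[(PySem.List.pyRange 0 s 1).length] m := by
  simp only [offset_py, String.reduceEq, if_true, reduceIte]
  exact foldl_const vbodyU _ _

theorem offsetA_down_none (m : List (List Int)) (s : Int) :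
    offset_py m "down" s none = vbodyD^[(PySem.List.pyRange 0 s 1).length] m := by
  simp only [offset_py, String.reduceEq, if_true, reduceIte]
  exact foldl_const vbodyD _ _

theorem vbodyU_eq (a b c d : List Int) (t : List (List Int)) :
    vbodyU (a :: b :: c :: d :: t) = rot4L (a :: b :: c :: d :: t) := by
  have h3 : PySem.List.pyRange 0 3 1 = [0, 1, 2] := by decide
  simp [vbodyU, rot4L, h3, PySem.List.pySetD_of_nonneg, PySem.List.pyGetD_ofNat',
    Int.reduceToNat, Int.reduceAdd, List.getD]

theorem vbodyD_eq (a b c d : List Int) (t : List (List Int)) :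
    vbodyD (a :: b :: c :: d :: t) = rot4R (a :: b :: c :: d :: t) := by
  have h3 : PySem.List.pyRange 3 0 (-1) = [3, 2, 1] := by decide
  simp [vbodyD, rot4R, h3, PySem.List.pySetD_of_nonneg, PySem.List.pyGetD_ofNat',
    Int.reduceToNat, Int.reduceSub, List.getD]

theorem A_up_none (m : List (List Int)) (s : Int) (hs : 0 ≤ s) (hm : 4 ≤ m.length) :
    offset_py m "up" s none = rot4L^[s.toNat % 4] m := by
  rw [offsetA_up_none, length_pyRange_one s hs]
  rw [iter_congr vbodyU rot4L (fun l => 4 ≤ l.length)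
    (fun x hx => by obtain ⟨a, b, c, d, t, rfl⟩ := exists4 hx; exact vbodyU_eq a b c d t)
    (fun x hx => by simpa [rot4L_len] using hx) _ m hm]
  exact iter_mod_four rot4L (fun l => 4 ≤ l.length)
    (fun x hx => by simpa [rot4L_len] using hx) (fun x hx => rot4L_four x hx) _ m hm

theorem A_down_none (m : List (List Int)) (s : Int) (hs : 0 ≤ s) (hm : 4 ≤ m.length) :
    offset_py m "down" s none = rot4R^[s.toNat % 4] m := by
  rw [offsetA_down_none, length_pyRange_one s hs]
  rw [iter_congr vbodyD rot4R (fun l => 4 ≤ l.length)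
    (fun x hx => by obtain ⟨a, b, c, d, t, rfl⟩ := exists4 hx; exact vbodyD_eq a b c d t)
    (fun x hx => by simpa [rot4R_len] using hx) _ m hm]
  exact iter_mod_four rot4R (fun l => 4 ≤ l.length)
    (fun x hx => by simpa [rot4R_len] using hx) (fun x hx => rot4R_four x hx) _ m hm

theorem B_up_none (m : List (List Int)) (s : Int) (hs : 0 < s) (hm : 4 ≤ m.length) :
    offset_py_alt m "up" s none = rot4L^[s.toNat % 4] m := by
  obtain ⟨a, b, c, d, t, rfl⟩ := exists4 hm
  have hmod := int_mod_four s (le_of_lt hs)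
  have hk4 : s.toNat % 4 < 4 := Nat.mod_lt _ (by norm_num)
  simp only [offset_py_alt, if_neg (by omega : ¬ s ≤ 0), String.reduceEq, reduceIte, hmod]
  set kn := s.toNat % 4 with hkn
  interval_cases kn <;>
    simp [PySem.List.slice_toNat, PySem.List.slice_to, PySem.List.slice_from,
      Int.reduceToNat, rot4L, Function.iterate_succ_apply]

theorem B_down_none (m : List (List Int)) (s : Int) (hs : 0 < s) (hm : 4 ≤ m.length) :
    offset_py_alt m "down" s none = rot4R^[s.toNat % 4] m := by
  obtain ⟨a, b, c, d, t, rfl⟩ := exists4 hm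
  have hmod := int_mod_four s (le_of_lt hs)
  have hk4 : s.toNat % 4 < 4 := Nat.mod_lt _ (by norm_num)
  have e0 : PySem.Int.mod (4 - (0 : Int)) 4 = 0 := by decide
  have e1 : PySem.Int.mod (4 - (1 : Int)) 4 = 3 := by decide
  have e2 : PySem.Int.mod (4 - (2 : Int)) 4 = 2 := by decide
  have e3 : PySem.Int.mod (4 - (3 : Int)) 4 = 1 := by decide
  simp only [offset_py_alt, if_neg (by omega : ¬ s ≤ 0), String.reduceEq, reduceIte, hmod]
  set kn := s.toNat % 4 with hkn
  interval_cases kn <;>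
    simp [e0, e1, e2, e3, PySem.List.slice_toNat, PySem.List.slice_to, PySem.List.slice_from,
      Int.reduceToNat, rot4R, Function.iterate_succ_apply]

-- ---------- row case (num = some n, direction right/left) ----------
def rbodyR (n : Int) (m : List (List Int)) : List (List Int) :=
  let cache := PySem.List.pyGetD (PySem.List.pyGetD m n []) 3 0
  let m := (PySem.List.pyRange 3 0 (-1)).foldl (fun m i =>
    PySem.List.pySetD m n (PySem.List.pySetD (PySem.List.pyGetD m n []) i
      (PySem.List.pyGetD (PySem.List.pyGetD m n []) (i - 1) 0))) m
  PySem.List.pySetD m n (PySem.List.pySetD (PySem.List.pyGetD m n []) 0 cache)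

def rbodyL (n : Int) (m : List (List Int)) : List (List Int) :=
  let cache := PySem.List.pyGetD (PySem.List.pyGetD m n []) 0 0
  let m := (PySem.List.pyRange 0 3 1).foldl (fun m i =>
    PySem.List.pySetD m n (PySem.List.pySetD (PySem.List.pyGetD m n []) i
      (PySem.List.pyGetD (PySem.List.pyGetD m n []) (i + 1) 0))) m
  PySem.List.pySetD m n (PySem.List.pySetD (PySem.List.pyGetD m n []) 3 cache)

def rowR (n : Int) (m : List (List Int)) : List (List Int) :=
  PySem.List.pySetD m n (rot4R (PySem.List.pyGetD m n []))

def rowL (n : Int) (m : List (List Int)) : List (List Int) :=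
  PySem.List.pySetD m n (rot4L (PySem.List.pyGetD m n []))

theorem offsetA_right (m : List (List Int)) (s : Int) (n : Int) :
    offset_py m "right" s (some n) = (rbodyR n)^[(PySem.List.pyRange 0 s 1).length] m := by
  simp only [offset_py, String.reduceEq, if_true, reduceIte]
  exact foldl_const (rbodyR n) _ _

theorem offsetA_left (m : List (List Int)) (s : Int) (n : Int) :
    offset_py m "left" s (some n) = (rbodyL n)^[(PySem.List.pyRange 0 s 1).length] m := by
  simp only [offset_py, String.reduceEq, if_true, reduceIte]
  exact foldl_const (rbodyL n) _ _

theorem rbodyR_eq (n : Int) (m : List (List Int)) (hn : PySem.Raise.InRange m.length n)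
    (hr : 4 ≤ (PySem.List.pyGetD m n []).length) :
    rbodyR n m = rowR n m := by
  obtain ⟨a, b, c, d, t, hrow⟩ := exists4 hr
  have h3 : PySem.List.pyRange 3 0 (-1) = [3, 2, 1] := by decide
  simp [rbodyR, rowR, h3, hrow, rot4R, getD_setD_self _ _ hn, setD_setD _ _ hn, len_setD, hn,
    PySem.List.pySetD_of_nonneg, PySem.List.pyGetD_ofNat', Int.reduceToNat, Int.reduceSub,
    List.getD]

theorem rbodyL_eq (n : Int) (m : List (List Int)) (hn : PySem.Raise.InRange m.length n)
    (hr : 4 ≤ (PySem.List.pyGetD m n []).length) :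
    rbodyL n m = rowL n m := by
  obtain ⟨a, b, c, d, t, hrow⟩ := exists4 hr
  have h3 : PySem.List.pyRange 0 3 1 = [0, 1, 2] := by decide
  simp [rbodyL, rowL, h3, hrow, rot4L, getD_setD_self _ _ hn, setD_setD _ _ hn, len_setD, hn,
    PySem.List.pySetD_of_nonneg, PySem.List.pyGetD_ofNat', Int.reduceToNat, Int.reduceAdd,
    List.getD]

theorem rowR_iter (n : Int) (m : List (List Int)) (hn : PySem.Raise.InRange m.length n) :
    ∀ t : Nat, (rowR n)^[t + 1] m = PySem.List.pySetD m n (rot4R^[t + 1] (PySem.List.pyGetD m n [])) := by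
  intro t
  induction t with
  | zero => simp [rowR]
  | succ t ih =>
    rw [show t + 1 + 1 = (t + 1) + 1 from rfl, Function.iterate_succ_apply', ih]
    simp [rowR, getD_setD_self _ _ hn, setD_setD _ _ hn, Function.iterate_succ_apply']

theorem rowL_iter (n : Int) (m : List (List Int)) (hn : PySem.Raise.InRange m.length n) :
    ∀ t : Nat, (rowL n)^[t + 1] m = PySem.List.pySetD m n (rot4L^[t + 1] (PySem.List.pyGetD m n [])) := by
  intro t
  induction t with
  | zero => simp [rowL]
  | succ t ih =>
    rw [show t + 1 + 1 = (t + 1) + 1 from rfl, Function.iterate_succ_apply', ih]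
    simp [rowL, getD_setD_self _ _ hn, setD_setD _ _ hn, Function.iterate_succ_apply']

theorem A_right_some (m : List (List Int)) (s n : Int) (hs : 0 < s)
    (hn : PySem.Raise.InRange m.length n) (hr : 4 ≤ (PySem.List.pyGetD m n []).length) :
    offset_py m "right" s (some n) =
      PySem.List.pySetD m n (rot4R^[s.toNat % 4] (PySem.List.pyGetD m n [])) := by
  rw [offsetA_right, length_pyRange_one s (le_of_lt hs)]
  rw [iter_congr (rbodyR n) (rowR n)
      (fun x => PySem.Raise.InRange x.length n ∧ 4 ≤ (PySem.List.pyGetD x n []).length)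
      (fun x hx => rbodyR_eq n x hx.1 hx.2)
      (fun x hx => by
        refine ⟨by simpa [rowR, len_setD] using hx.1, ?_⟩
        simp [rowR, getD_setD_self _ _ hx.1, rot4R_len, hx.2])
      _ m ⟨hn, hr⟩]
  obtain ⟨t, ht⟩ : ∃ t, s.toNat = t + 1 := ⟨s.toNat - 1, by omega⟩
  rw [ht, rowR_iter n m hn t]
  congr 1
  exact iter_mod_four rot4R (fun l => 4 ≤ l.length)
      (fun x hx => by simpa [rot4R_len] using hx) (fun x hx => rot4R_four x hx) _ _ hr

theorem A_left_some (m : List (List Int)) (s n : Int) (hs : 0 < s)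
    (hn : PySem.Raise.InRange m.length n) (hr : 4 ≤ (PySem.List.pyGetD m n []).length) :
    offset_py m "left" s (some n) =
      PySem.List.pySetD m n (rot4L^[s.toNat % 4] (PySem.List.pyGetD m n [])) := by
  rw [offsetA_left, length_pyRange_one s (le_of_lt hs)]
  rw [iter_congr (rbodyL n) (rowL n)
      (fun x => PySem.Raise.InRange x.length n ∧ 4 ≤ (PySem.List.pyGetD x n []).length)
      (fun x hx => rbodyL_eq n x hx.1 hx.2)
      (fun x hx => by
        refine ⟨by simpa [rowL, len_setD] using hx.1, ?_⟩
        simp [rowL, getD_setD_self _ _ hx.1, rot4L_len, hx.2])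
      _ m ⟨hn, hr⟩]
  obtain ⟨t, ht⟩ : ∃ t, s.toNat = t + 1 := ⟨s.toNat - 1, by omega⟩
  rw [ht, rowL_iter n m hn t]
  congr 1
  exact iter_mod_four rot4L (fun l => 4 ≤ l.length)
      (fun x hx => by simpa [rot4L_len] using hx) (fun x hx => rot4L_four x hx) _ _ hr

theorem B_right_some (m : List (List Int)) (s n : Int) (hs : 0 < s)
    (hn : PySem.Raise.InRange m.length n) (hr : 4 ≤ (PySem.List.pyGetD m n []).length) :
    offset_py_alt m "right" s (some n) =
      PySem.List.pySetD m n (rot4R^[s.toNat % 4] (PySem.List.pyGetD m n [])) := by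
  have hmod := int_mod_four s (le_of_lt hs)
  have hk4 : s.toNat % 4 < 4 := Nat.mod_lt _ (by norm_num)
  obtain ⟨a, b, c, d, t, hrow⟩ := exists4 hr
  have e0 : PySem.Int.mod (4 - (0 : Int)) 4 = 0 := by decide
  have e1 : PySem.Int.mod (4 - (1 : Int)) 4 = 3 := by decide
  have e2 : PySem.Int.mod (4 - (2 : Int)) 4 = 2 := by decide
  have e3 : PySem.Int.mod (4 - (3 : Int)) 4 = 1 := by decide
  simp only [offset_py_alt, if_neg (by omega : ¬ s ≤ 0), String.reduceEq, reduceIte, hmod,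
    or_false, false_or, or_true, true_or, if_false, if_true]
  set kn := s.toNat % 4 with hkn
  interval_cases kn <;>
    simp [hrow, e0, e1, e2, e3, PySem.List.slice_toNat, PySem.List.slice_to,
      PySem.List.slice_from, Int.reduceToNat, rot4R, Function.iterate_succ_apply]

theorem B_left_some (m : List (List Int)) (s n : Int) (hs : 0 < s)
    (hn : PySem.Raise.InRange m.length n) (hr : 4 ≤ (PySem.List.pyGetD m n []).length) :
    offset_py_alt m "left" s (some n) =
      PySem.List.pySetD m n (rot4L^[s.toNat % 4] (PySem.List.pyGetD m n [])) := by
  have hmod := int_mod_four s (le_of_lt hs)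
  have hk4 : s.toNat % 4 < 4 := Nat.mod_lt _ (by norm_num)
  obtain ⟨a, b, c, d, t, hrow⟩ := exists4 hr
  simp only [offset_py_alt, if_neg (by omega : ¬ s ≤ 0), String.reduceEq, reduceIte, hmod,
    or_false, false_or, or_true, true_or, if_false, if_true]
  set kn := s.toNat % 4 with hkn
  interval_cases kn <;>
    simp [hrow, PySem.List.slice_toNat, PySem.List.slice_to,
      PySem.List.slice_from, Int.reduceToNat, rot4L, Function.iterate_succ_apply]

-- ---------- column case (num = some n, direction up/down) ----------
def cbodyU (n : Int) (m : List (List Int)) : List (List Int) :=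
  let cache := PySem.List.pyGetD (PySem.List.pyGetD m 0 []) n 0
  let m := (PySem.List.pyRange 0 3 1).foldl (fun m i =>
    PySem.List.pySetD m i (PySem.List.pySetD (PySem.List.pyGetD m i []) n
      (PySem.List.pyGetD (PySem.List.pyGetD m (i + 1) []) n 0))) m
  PySem.List.pySetD m 3 (PySem.List.pySetD (PySem.List.pyGetD m 3 []) n cache)

def cbodyD (n : Int) (m : List (List Int)) : List (List Int) :=
  let cache := PySem.List.pyGetD (PySem.List.pyGetD m 3 []) n 0
  let m := (PySem.List.pyRange 3 0 (-1)).foldl (fun m i =>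
    PySem.List.pySetD m i (PySem.List.pySetD (PySem.List.pyGetD m i []) n
      (PySem.List.pyGetD (PySem.List.pyGetD m (i - 1) []) n 0))) m
  PySem.List.pySetD m 0 (PySem.List.pySetD (PySem.List.pyGetD m 0 []) n cache)

def colU (n : Int) : List (List Int) → List (List Int)
  | r0 :: r1 :: r2 :: r3 :: rest =>
      PySem.List.pySetD r0 n (PySem.List.pyGetD r1 n 0) ::
      PySem.List.pySetD r1 n (PySem.List.pyGetD r2 n 0) ::
      PySem.List.pySetD r2 n (PySem.List.pyGetD r3 n 0) ::
      PySem.List.pySetD r3 n (PySem.List.pyGetD r0 n 0) :: rest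
  | m => m

def colD (n : Int) : List (List Int) → List (List Int)
  | r0 :: r1 :: r2 :: r3 :: rest =>
      PySem.List.pySetD r0 n (PySem.List.pyGetD r3 n 0) ::
      PySem.List.pySetD r1 n (PySem.List.pyGetD r0 n 0) ::
      PySem.List.pySetD r2 n (PySem.List.pyGetD r1 n 0) ::
      PySem.List.pySetD r3 n (PySem.List.pyGetD r2 n 0) :: rest
  | m => m

def ColPre (n : Int) (m : List (List Int)) : Prop :=
  4 ≤ m.length ∧ ∀ r ∈ m.take 4, PySem.Raise.InRange r.length n

theorem offsetA_up_some (m : List (List Int)) (s : Int) (n : Int) :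
    offset_py m "up" s (some n) = (cbodyU n)^[(PySem.List.pyRange 0 s 1).length] m := by
  simp only [offset_py, String.reduceEq, if_true, reduceIte]
  exact foldl_const (cbodyU n) _ _

theorem offsetA_down_some (m : List (List Int)) (s : Int) (n : Int) :
    offset_py m "down" s (some n) = (cbodyD n)^[(PySem.List.pyRange 0 s 1).length] m := by
  simp only [offset_py, String.reduceEq, if_true, reduceIte]
  exact foldl_const (cbodyD n) _ _

theorem cbodyU_eq (n : Int) (r0 r1 r2 r3 : List Int) (rest : List (List Int)) :
    cbodyU n (r0 :: r1 :: r2 :: r3 :: rest) = colU n (r0 :: r1 :: r2 :: r3 :: rest) := by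
  have h3 : PySem.List.pyRange 0 3 1 = [0, 1, 2] := by decide
  simp [cbodyU, colU, h3, PySem.List.pySetD_of_nonneg, PySem.List.pyGetD_ofNat',
    Int.reduceToNat, Int.reduceAdd, List.getD]

theorem cbodyD_eq (n : Int) (r0 r1 r2 r3 : List Int) (rest : List (List Int)) :
    cbodyD n (r0 :: r1 :: r2 :: r3 :: rest) = colD n (r0 :: r1 :: r2 :: r3 :: rest) := by
  have h3 : PySem.List.pyRange 3 0 (-1) = [3, 2, 1] := by decide
  simp [cbodyD, colD, h3, PySem.List.pySetD_of_nonneg, PySem.List.pyGetD_ofNat',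
    Int.reduceToNat, Int.reduceSub, List.getD]

theorem colU_pre (n : Int) (m : List (List Int)) (h : ColPre n m) : ColPre n (colU n m) := by
  obtain ⟨hm, hr⟩ := h
  obtain ⟨r0, r1, r2, r3, rest, rfl⟩ := exists4 hm
  have h0 := hr r0 (by simp); have h1 := hr r1 (by simp); have h2 := hr r2 (by simp)
  have h3 := hr r3 (by simp)
  refine ⟨by simp [colU], ?_⟩
  intro r hmem
  simp [colU, List.take_succ_cons] at hmem
  rcases hmem with rfl | rfl | rfl | rfl <;> simpa [len_setD] using ‹_›

theorem colD_pre (n : Int) (m : List (List Int)) (h : ColPre n m) : ColPre n (colD n m) := by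
  obtain ⟨hm, hr⟩ := h
  obtain ⟨r0, r1, r2, r3, rest, rfl⟩ := exists4 hm
  have h0 := hr r0 (by simp); have h1 := hr r1 (by simp); have h2 := hr r2 (by simp)
  have h3 := hr r3 (by simp)
  refine ⟨by simp [colD], ?_⟩
  intro r hmem
  simp [colD, List.take_succ_cons] at hmem
  rcases hmem with rfl | rfl | rfl | rfl <;> simpa [len_setD] using ‹_›

theorem colU_four (n : Int) (m : List (List Int)) (h : ColPre n m) : (colU n)^[4] m = m := by
  obtain ⟨hm, hr⟩ := h
  obtain ⟨r0, r1, r2, r3, rest, rfl⟩ := exists4 hm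
  have h0 := hr r0 (by simp); have h1 := hr r1 (by simp); have h2 := hr r2 (by simp)
  have h3 := hr r3 (by simp)
  simp [colU, Function.iterate_succ_apply, getD_setD_self, setD_setD, setD_getD_self,
    len_setD, h0, h1, h2, h3]

theorem colD_four (n : Int) (m : List (List Int)) (h : ColPre n m) : (colD n)^[4] m = m := by
  obtain ⟨hm, hr⟩ := h
  obtain ⟨r0, r1, r2, r3, rest, rfl⟩ := exists4 hm
  have h0 := hr r0 (by simp); have h1 := hr r1 (by simp); have h2 := hr r2 (by simp)
  have h3 := hr r3 (by simp)
  simp [colD, Function.iterate_succ_apply, getD_setD_self, setD_setD, setD_getD_self,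
    len_setD, h0, h1, h2, h3]

theorem A_up_some (m : List (List Int)) (s n : Int) (hs : 0 ≤ s) (h : ColPre n m) :
    offset_py m "up" s (some n) = (colU n)^[s.toNat % 4] m := by
  rw [offsetA_up_some, length_pyRange_one s hs]
  rw [iter_congr (cbodyU n) (colU n) (ColPre n)
      (fun x hx => by
        obtain ⟨r0, r1, r2, r3, rest, rfl⟩ := exists4 hx.1
        exact cbodyU_eq n r0 r1 r2 r3 rest)
      (colU_pre n) _ m h]
  exact iter_mod_four (colU n) (ColPre n) (colU_pre n) (colU_four n) _ m h

theorem A_down_some (m : List (List Int)) (s n : Int) (hs : 0 ≤ s) (h : ColPre n m) :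
    offset_py m "down" s (some n) = (colD n)^[s.toNat % 4] m := by
  rw [offsetA_down_some, length_pyRange_one s hs]
  rw [iter_congr (cbodyD n) (colD n) (ColPre n)
      (fun x hx => by
        obtain ⟨r0, r1, r2, r3, rest, rfl⟩ := exists4 hx.1
        exact cbodyD_eq n r0 r1 r2 r3 rest)
      (colD_pre n) _ m h]
  exact iter_mod_four (colD n) (ColPre n) (colD_pre n) (colD_four n) _ m h

theorem B_up_some (m : List (List Int)) (s n : Int) (hs : 0 < s) (h : ColPre n m) :
    offset_py_alt m "up" s (some n) = (colU n)^[s.toNat % 4] m := by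
  obtain ⟨hm, hr⟩ := h
  obtain ⟨r0, r1, r2, r3, rest, rfl⟩ := exists4 hm
  have h0 := hr r0 (by simp); have h1 := hr r1 (by simp); have h2 := hr r2 (by simp)
  have h3 := hr r3 (by simp)
  have hmod := int_mod_four s (le_of_lt hs)
  have hk4 : s.toNat % 4 < 4 := Nat.mod_lt _ (by norm_num)
  have h4l : PySem.List.pyRange 0 4 1 = [0, 1, 2, 3] := by decide
  simp only [offset_py_alt, if_neg (by omega : ¬ s ≤ 0), String.reduceEq, reduceIte, hmod,
    or_false, false_or, or_true, true_or, if_false, if_true, h4l]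
  set kn := s.toNat % 4 with hkn
  interval_cases kn <;>
    simp [colU, Function.iterate_succ_apply, PySem.List.slice_toNat, PySem.List.slice_to,
      PySem.List.slice_from, Int.reduceToNat, PySem.List.pySetD_of_nonneg,
      PySem.List.pyGetD_ofNat', List.getD, getD_setD_self, setD_setD, setD_getD_self,
      len_setD, h0, h1, h2, h3]

theorem B_down_some (m : List (List Int)) (s n : Int) (hs : 0 < s) (h : ColPre n m) :
    offset_py_alt m "down" s (some n) = (colD n)^[s.toNat % 4] m := by
  obtain ⟨hm, hr⟩ := h
  obtain ⟨r0, r1, r2, r3, rest, rfl⟩ := exists4 hm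
  have h0 := hr r0 (by simp); have h1 := hr r1 (by simp); have h2 := hr r2 (by simp)
  have h3 := hr r3 (by simp)
  have hmod := int_mod_four s (le_of_lt hs)
  have hk4 : s.toNat % 4 < 4 := Nat.mod_lt _ (by norm_num)
  have h4l : PySem.List.pyRange 0 4 1 = [0, 1, 2, 3] := by decide
  have e0 : PySem.Int.mod (4 - (0 : Int)) 4 = 0 := by decide
  have e1 : PySem.Int.mod (4 - (1 : Int)) 4 = 3 := by decide
  have e2 : PySem.Int.mod (4 - (2 : Int)) 4 = 2 := by decide
  have e3 : PySem.Int.mod (4 - (3 : Int)) 4 = 1 := by decide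
  simp only [offset_py_alt, if_neg (by omega : ¬ s ≤ 0), String.reduceEq, reduceIte, hmod,
    or_false, false_or, or_true, true_or, if_false, if_true, h4l]
  set kn := s.toNat % 4 with hkn
  interval_cases kn <;>
    simp [colD, e0, e1, e2, e3, Function.iterate_succ_apply, PySem.List.slice_toNat,
      PySem.List.slice_to, PySem.List.slice_from, Int.reduceToNat,
      PySem.List.pySetD_of_nonneg, PySem.List.pyGetD_ofNat', List.getD, getD_setD_self,
      setD_setD, setD_getD_self, len_setD, h0, h1, h2, h3]

-- ---------- trivial branches ----------
theorem A_nonpos (m : List (List Int)) (dir : String) (s : Int) (num : Option Int) (hs : s ≤ 0) :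
    offset_py m dir s num = m := by
  cases num <;> simp only [offset_py] <;> split_ifs <;> simp [pyRange_nonpos hs]

theorem B_nonpos (m : List (List Int)) (dir : String) (s : Int) (num : Option Int) (hs : s ≤ 0) :
    offset_py_alt m dir s num = m := by
  simp [offset_py_alt, hs]

theorem A_else_none (m : List (List Int)) (dir : String) (s : Int)
    (h1 : dir ≠ "up") (h2 : dir ≠ "down") : offset_py m dir s none = m := by
  simp [offset_py, h1, h2]

theorem B_else_none (m : List (List Int)) (dir : String) (s : Int)
    (h1 : dir ≠ "up") (h2 : dir ≠ "down") : offset_py_alt m dir s none = m := by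
  simp [offset_py_alt, h1, h2]

theorem A_else_some (m : List (List Int)) (dir : String) (s n : Int)
    (h1 : dir ≠ "up") (h2 : dir ≠ "down") (h3 : dir ≠ "right") (h4 : dir ≠ "left") :
    offset_py m dir s (some n) = m := by
  simp [offset_py, h1, h2, h3, h4]

theorem B_else_some (m : List (List Int)) (dir : String) (s n : Int)
    (h1 : dir ≠ "up") (h2 : dir ≠ "down") (h3 : dir ≠ "right") (h4 : dir ≠ "left") :
    offset_py_alt m dir s (some n) = m := by
  simp [offset_py_alt, h1, h2, h3, h4]

-- ===== VERDICT (by name: the statement is the Claim_ definition above) =====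
theorem offset_py_spec : Claim_equal_offset_py := by
  intro m dir s num _hdom hpre
  unfold Spec_offset_py
  by_cases hs : s ≤ 0
  · rw [A_nonpos m dir s num hs, B_nonpos m dir s num hs]
  · have hs' : 0 < s := by omega
    have hpre' := hpre.resolve_left hs
    cases num with
    | none =>
      by_cases h1 : dir = "up"
      · subst h1
        simp only [String.reduceEq, or_self, reduceIte, or_false, false_or, or_true, true_or] at hpre'
        rw [A_up_none m s (le_of_lt hs') hpre', B_up_none m s hs' hpre']
      · by_cases h2 : dir = "down"
        · subst h2
          simp only [String.reduceEq, or_self, reduceIte, or_false, false_or, or_true, true_or] at hpre'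
          rw [A_down_none m s (le_of_lt hs') hpre', B_down_none m s hs' hpre']
        · rw [A_else_none m dir s h1 h2, B_else_none m dir s h1 h2]
    | some n =>
      by_cases h1 : dir = "up"
      · subst h1
        simp only [String.reduceEq, or_self, reduceIte, or_false, false_or, or_true, true_or] at hpre'
        rw [A_up_some m s n (le_of_lt hs') hpre', B_up_some m s n hs' hpre']
      · by_cases h2 : dir = "down"
        · subst h2
          simp only [String.reduceEq, or_self, reduceIte, or_false, false_or, or_true, true_or] at hpre'
          rw [A_down_some m s n (le_of_lt hs') hpre', B_down_some m s n hs' hpre']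
        · by_cases h3 : dir = "right"
          · subst h3
            simp only [String.reduceEq, or_self, reduceIte, or_false, false_or, or_true, true_or] at hpre'
            rw [A_right_some m s n hs' hpre'.1 hpre'.2, B_right_some m s n hs' hpre'.1 hpre'.2]
          · by_cases h4 : dir = "left"
            · subst h4
              simp only [String.reduceEq, or_self, reduceIte, or_false, false_or, or_true, true_or] at hpre'
              rw [A_left_some m s n hs' hpre'.1 hpre'.2, B_left_some m s n hs' hpre'.1 hpre'.2]
            · rw [A_else_some m dir s n h1 h2 h3 h4, B_else_some m dir s n h1 h2 h3 h4]
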